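-- pv_equiv track=rewrite | github.com/DragunWF/Competitive-Programming | CodeWars/python/6_kyu/change_it_up.py | changer
-- ===== SOURCE A (Python) =====
-- from string import ascii_uppercase, ascii_lowercase
--
-- def changer(s: str) -> str:
--     VOWELS = "aeiou"
--     switched_letters = ""
--     for char in s:
--         if not char.isalpha():
--             switched_letters += char
--         elif char.isupper():
--             current_index = ascii_uppercase.index(char)
--             switched_letters += ascii_uppercase[(current_index + 1) % 26]
--         else:
--             current_index = ascii_lowercase.index(char)
--             switched_letters += ascii_lowercase[(current_index + 1) % 26]
--     swapped_case = ""
--     for char in switched_letters: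
--         if char.lower() in VOWELS:
--             swapped_case += char.upper()
--         else:
--             swapped_case += char.lower()
--     return swapped_case
-- ===== SOURCE B (Python) =====
-- from string import ascii_uppercase, ascii_lowercase
--
--
-- def changer(s: str) -> str:
--     # Precompute one 52-letter translation table: shift within the same-case
--     # alphabet, then case is decided by vowel-ness of the shifted letter.
--     table = {}
--     for i, (lo, up) in enumerate(zip(ascii_lowercase, ascii_uppercase)):
--         shifted = ascii_lowercase[(i + 1) % 26]
--         if shifted in "aeiou":
--             shifted = shifted.upper()
--         table[lo] = shifted
--         table[up] = shifted
--     return s.translate(str.maketrans(table))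
-- ===== Notes on version B (the rewrite author's own statement) =====
-- stated objective: faster
-- what changed: B precomputes a single 52-entry character translation table (shift + vowel-case decided in one map) and returns s.translate(table) in one C-level pass, instead of A's two sequential per-character branching loops with a repeated str.index scan and quadratic string concatenation.
import Mathlib
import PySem

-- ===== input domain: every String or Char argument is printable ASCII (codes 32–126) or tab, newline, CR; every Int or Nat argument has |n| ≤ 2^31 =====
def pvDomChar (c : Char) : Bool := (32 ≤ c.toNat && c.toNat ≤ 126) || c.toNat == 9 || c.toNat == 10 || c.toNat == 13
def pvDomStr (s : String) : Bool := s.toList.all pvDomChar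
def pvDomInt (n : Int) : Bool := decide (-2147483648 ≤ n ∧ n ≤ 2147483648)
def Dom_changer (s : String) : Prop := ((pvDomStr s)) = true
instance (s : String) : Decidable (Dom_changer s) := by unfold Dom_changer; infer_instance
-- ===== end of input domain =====

-- B builds one 52-letter translation table and translates in a single pass;
-- A makes two branching passes with a linear .index scan per letter.

-- ===== PORT A =====
def changer (s : String) : String :=
  let vowels : List Char := "aeiou".toList
  let switched : List Char := s.toList.foldl (fun acc c =>
    if !(PySem.Chars.isalpha c) then acc ++ [c]
    else if PySem.Chars.isupper c then
      match PySem.List.index? ("ABCDEFGHIJKLMNOPQRSTUVWXYZ".toList) c with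
      | some i => acc ++ [(PySem.List.pyGet? ("ABCDEFGHIJKLMNOPQRSTUVWXYZ".toList)
          (PySem.Int.mod ((i : Int) + 1) 26)).getD c]
      | none => acc ++ [c]  -- unreachable: isupper c means c occurs in ascii_uppercase, .index cannot raise
    else
      match PySem.List.index? ("abcdefghijklmnopqrstuvwxyz".toList) c with
      | some i => acc ++ [(PySem.List.pyGet? ("abcdefghijklmnopqrstuvwxyz".toList)
          (PySem.Int.mod ((i : Int) + 1) 26)).getD c]
      | none => acc ++ [c]  -- unreachable likewise
    ) []
  let swapped : List Char := switched.foldl (fun acc c =>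
    if PySem.Chars.isIn [PySem.Chars.lowerChar c] vowels then acc ++ [PySem.Chars.upperChar c]
    else acc ++ [PySem.Chars.lowerChar c]) []
  String.mk swapped

-- ===== PORT B =====
-- the translation table built once (Source B's table-building loop)
def changerTable : PySem.Dict Char Char :=
  (PySem.List.enumerate (("abcdefghijklmnopqrstuvwxyz".toList).zip
      ("ABCDEFGHIJKLMNOPQRSTUVWXYZ".toList))).foldl
    (fun tbl p =>
      let shifted := (PySem.List.pyGet? ("abcdefghijklmnopqrstuvwxyz".toList)
          (PySem.Int.mod (p.1 + 1) 26)).getD p.2.1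
      let shifted := if PySem.Chars.isIn [shifted] ("aeiou".toList)
        then PySem.Chars.upperChar shifted else shifted
      (tbl.insert p.2.1 shifted).insert p.2.2 shifted)
    PySem.Dict.empty

def changer_alt (s : String) : String :=
  -- s.translate(table): each char is replaced by its table image, identity when absent
  String.mk (s.toList.map (fun c => PySem.Dict.getD changerTable c c))

-- ===== PRECONDITION & SPEC =====
def Spec_changer (s : String) (out : String) : Prop := out = changer_alt s
instance (s : String) (out : String) : Decidable (Spec_changer s out) := by unfold Spec_changer; infer_instance

-- ===== CLAIM (what is proved, stated in full; the proofs are below) =====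
def Claim_equal_changer : Prop := ∀ (s : String), Dom_changer s → Spec_changer s (changer s)

-- ===== LEMMAS AND PROOFS =====

-- A's first pass as a pure per-character function
def gShift (c : Char) : Char :=
  if !(PySem.Chars.isalpha c) then c
  else if PySem.Chars.isupper c then
    match PySem.List.index? ("ABCDEFGHIJKLMNOPQRSTUVWXYZ".toList) c with
    | some i => (PySem.List.pyGet? ("ABCDEFGHIJKLMNOPQRSTUVWXYZ".toList)
        (PySem.Int.mod ((i : Int) + 1) 26)).getD c
    | none => c
  else
    match PySem.List.index? ("abcdefghijklmnopqrstuvwxyz".toList) c with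
    | some i => (PySem.List.pyGet? ("abcdefghijklmnopqrstuvwxyz".toList)
        (PySem.Int.mod ((i : Int) + 1) 26)).getD c
    | none => c

-- A's second pass as a pure per-character function
def gSwap (c : Char) : Char :=
  if PySem.Chars.isIn [PySem.Chars.lowerChar c] ("aeiou".toList) then PySem.Chars.upperChar c
  else PySem.Chars.lowerChar c

lemma fold_shift (l : List Char) (acc : List Char) :
    l.foldl (fun acc c =>
      if !(PySem.Chars.isalpha c) then acc ++ [c]
      else if PySem.Chars.isupper c then
        match PySem.List.index? ("ABCDEFGHIJKLMNOPQRSTUVWXYZ".toList) c with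
        | some i => acc ++ [(PySem.List.pyGet? ("ABCDEFGHIJKLMNOPQRSTUVWXYZ".toList)
            (PySem.Int.mod ((i : Int) + 1) 26)).getD c]
        | none => acc ++ [c]
      else
        match PySem.List.index? ("abcdefghijklmnopqrstuvwxyz".toList) c with
        | some i => acc ++ [(PySem.List.pyGet? ("abcdefghijklmnopqrstuvwxyz".toList)
            (PySem.Int.mod ((i : Int) + 1) 26)).getD c]
        | none => acc ++ [c]) acc = acc ++ l.map gShift := by
  rw [PySem.List.foldl_congr_mem l _ (fun acc c => acc ++ [gShift c]) acc
    (by intro acc c _; simp only [gShift]; split <;> first | rfl | (split <;> split <;> rfl))]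
  exact PySem.List.foldl_append_singleton_eq_map gShift l acc

lemma fold_swap (l : List Char) (acc : List Char) :
    l.foldl (fun acc c =>
      if PySem.Chars.isIn [PySem.Chars.lowerChar c] ("aeiou".toList) then
        acc ++ [PySem.Chars.upperChar c]
      else acc ++ [PySem.Chars.lowerChar c]) acc = acc ++ l.map gSwap := by
  rw [PySem.List.foldl_congr_mem l _ (fun acc c => acc ++ [gSwap c]) acc
    (by intro acc c _; simp only [gSwap]; split <;> rfl)]
  exact PySem.List.foldl_append_singleton_eq_map gSwap l acc

lemma changer_eq_map (s : String) :
    changer s = String.mk (s.toList.map (fun c => gSwap (gShift c))) := by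
  unfold changer
  simp only []
  rw [fold_shift, List.nil_append, fold_swap, List.nil_append, List.map_map]
  rfl

lemma char_key : ∀ (c : Char), c.toNat < 127 →
    gSwap (gShift c) = PySem.Dict.getD changerTable c c := by
  have h : ∀ n, n < 127 →
      gSwap (gShift (Char.ofNat n)) =
        PySem.Dict.getD changerTable (Char.ofNat n) (Char.ofNat n) := by
    set_option maxRecDepth 4096 in decide
  intro c hc
  have := h c.toNat hc
  rwa [Char.ofNat_toNat] at this

-- ===== VERDICT (by name: the statement is the Claim_ definition above) =====
theorem changer_spec : Claim_equal_changer := by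
  intro s hdom
  unfold Spec_changer changer_alt
  rw [changer_eq_map]
  apply congrArg String.mk
  apply List.map_congr_left
  intro c hc
  apply char_key
  have hd : pvDomChar c = true := by
    have := (List.all_eq_true.mp hdom) c hc
    exact this
  simp only [pvDomChar, Bool.or_eq_true, Bool.and_eq_true, decide_eq_true_eq, beq_iff_eq] at hd
  omega
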